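-- pv_equiv track=rewrite | github.com/techize/eks_validator | scripts/validate_sensitive_data.py | _find_line_number
-- ===== SOURCE A (Python) =====
-- def _find_line_number(content: str, match) -> int:
--     """Find the line number where a match occurs."""
--     # Handle both string and tuple matches (from regex capture groups)
--     if isinstance(match, tuple):
--         match_str = "".join(str(m) for m in match if m is not None)
--     else:
--         match_str = str(match)
--
--     lines = content.split("\n")
--     for i, line in enumerate(lines, 1):
--         if match_str in line:
--             return i
--     return 0
-- ===== SOURCE B (Python) =====
-- def _find_line_number(content: str, match) -> int:
--     """Find the line number where a match occurs."""
--     # Same normalization as the original.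
--     if isinstance(match, tuple):
--         match_str = "".join(str(m) for m in match if m is not None)
--     else:
--         match_str = str(match)
--
--     # A pattern containing a newline never lies within a single line.
--     if "\n" in match_str:
--         return 0
--     idx = content.find(match_str)
--     if idx == -1:
--         return 0
--     return content[:idx].count("\n") + 1
-- ===== Notes on version B (the rewrite author's own statement) =====
-- stated objective: alternative
-- what changed: Replaces the per-line scan (split('\n') + a membership test on every line) with a single content.find for the first occurrence plus a newline count over the prefix before the hit.
import Mathlib
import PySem

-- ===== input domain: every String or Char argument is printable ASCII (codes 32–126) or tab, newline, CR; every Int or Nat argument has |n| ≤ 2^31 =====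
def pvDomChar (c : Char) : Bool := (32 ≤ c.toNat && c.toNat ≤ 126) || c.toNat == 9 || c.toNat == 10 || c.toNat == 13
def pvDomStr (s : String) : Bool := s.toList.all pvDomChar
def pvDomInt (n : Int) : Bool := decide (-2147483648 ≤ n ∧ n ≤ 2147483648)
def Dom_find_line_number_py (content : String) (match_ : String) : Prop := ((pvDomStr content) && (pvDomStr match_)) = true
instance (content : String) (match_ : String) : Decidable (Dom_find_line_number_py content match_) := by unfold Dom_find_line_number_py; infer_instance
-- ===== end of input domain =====

-- B replaces A's per-line scan (split("\n") + an 'in' test on every line) by one content.find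
-- plus a newline count over the prefix before the hit; return values are proved equal.

-- ===== PORT A =====
-- the 'for i, line in enumerate(lines, 1): if match_str in line: return i' loop
def pyLineLoop (m : List Char) : List (List Char) → Int → Int
  | [], _ => 0
  | line :: ls, i => if PySem.Chars.isIn m line then i else pyLineLoop m ls (i + 1)

def find_line_number_py (content : String) (match_ : String) : Int :=
  -- match_ is a str, so match_str = str(match_) = match_
  pyLineLoop match_.toList (PySem.Chars.splitOn content.toList ['\n']) 1

-- ===== PORT B =====
def find_line_number_py_alt (content : String) (match_ : String) : Int :=
  if PySem.Str.isIn "\n" match_ then 0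
  else
    let idx := PySem.Str.find content match_
    if idx = -1 then 0
    else (PySem.Chars.count (PySem.List.slice content.toList none (some idx)) ['\n'] : Int) + 1

-- ===== PRECONDITION & SPEC =====
def Spec_find_line_number_py (content : String) (match_ : String) (out : Int) : Prop := out = find_line_number_py_alt content match_
instance (content : String) (match_ : String) (out : Int) : Decidable (Spec_find_line_number_py content match_ out) := by unfold Spec_find_line_number_py; infer_instance

-- ===== CLAIM (what is proved, stated in full; the proofs are below) =====
def Claim_equal_find_line_number_py : Prop := ∀ (content : String) (match_ : String), Dom_find_line_number_py content match_ → Spec_find_line_number_py content match_ (find_line_number_py content match_)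

-- ===== LEMMAS AND PROOFS =====

-- proof-side model of content.split("\n")
def nlSplit : List Char → List (List Char)
  | [] => [[]]
  | c :: t =>
    if c = '\n' then [] :: nlSplit t
    else
      match nlSplit t with
      | p :: ps => (c :: p) :: ps
      | [] => [[c]]

theorem nlSplit_ne_nil (cs : List Char) : nlSplit cs ≠ [] := by
  cases cs with
  | nil => simp [nlSplit]
  | cons c t =>
    simp only [nlSplit]
    split
    · simp
    · split <;> simp

theorem splitOn_go_nl (l : List Char) : ∀ (fuel : Nat) (cur : List Char) (acc : List (List Char)),
    l.length ≤ fuel →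
    PySem.Chars.splitOn.go ['\n'] fuel l cur acc
      = acc.reverse ++ (nlSplit l).modifyHead (cur.reverse ++ ·) := by
  induction l with
  | nil =>
    intro fuel cur acc _
    cases fuel <;> simp [PySem.Chars.splitOn.go, nlSplit]
  | cons c t ih =>
    intro fuel cur acc h
    cases fuel with
    | zero => simp at h
    | succ f =>
      by_cases hc : c = '\n'
      · subst hc
        rw [show PySem.Chars.splitOn.go ['\n'] (f+1) ('\n' :: t) cur acc
              = PySem.Chars.splitOn.go ['\n'] f t [] (cur.reverse :: acc) by
            simp [PySem.Chars.splitOn.go, List.isPrefixOf]]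
        rw [ih f [] (cur.reverse :: acc) (by simpa using h)]
        simp [nlSplit]
        cases hnt : nlSplit t with
        | nil => exact absurd hnt (nlSplit_ne_nil t)
        | cons p ps => simp
      · rw [show PySem.Chars.splitOn.go ['\n'] (f+1) (c :: t) cur acc
              = PySem.Chars.splitOn.go ['\n'] f t (c :: cur) acc by
            simp [PySem.Chars.splitOn.go, List.isPrefixOf, Ne.symm hc]]
        rw [ih f (c :: cur) acc (by simpa using h)]
        simp only [nlSplit, if_neg hc]
        cases hnt : nlSplit t with
        | nil => exact absurd hnt (nlSplit_ne_nil t)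
        | cons p ps => simp

theorem splitOn_nl (cs : List Char) : PySem.Chars.splitOn cs ['\n'] = nlSplit cs := by
  rw [show PySem.Chars.splitOn cs ['\n'] = PySem.Chars.splitOn.go ['\n'] (cs.length + 1) cs [] [] from rfl]
  rw [splitOn_go_nl cs (cs.length + 1) [] [] (by omega)]
  cases hnt : nlSplit cs with
  | nil => exact absurd hnt (nlSplit_ne_nil cs)
  | cons p ps => simp

theorem nlSplit_no_nl {l : List Char} (h : '\n' ∉ l) : nlSplit l = [l] := by
  induction l with
  | nil => rfl
  | cons c t ih =>
    simp only [List.mem_cons, not_or] at h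
    have hc : ¬ c = '\n' := fun e => h.1 e.symm
    simp only [nlSplit, if_neg hc, ih h.2]

theorem nlSplit_append {l : List Char} (r : List Char) (h : '\n' ∉ l) :
    nlSplit (l ++ '\n' :: r) = l :: nlSplit r := by
  induction l with
  | nil => simp [nlSplit]
  | cons c t ih =>
    simp only [List.mem_cons, not_or] at h
    have hc : c ≠ '\n' := fun e => h.1 e.symm
    simp only [List.cons_append, nlSplit, if_neg hc, ih h.2]

theorem nlSplit_mem {cs p : List Char} (h : p ∈ nlSplit cs) : '\n' ∉ p := by
  induction cs generalizing p with
  | nil => simp [nlSplit] at h; simp [h]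
  | cons c t ih =>
    by_cases hc : c = '\n'
    · subst hc
      rw [show nlSplit ('\n' :: t) = [] :: nlSplit t from by simp [nlSplit]] at h
      rcases List.mem_cons.mp h with h | h
      · simp [h]
      · exact ih h
    · simp only [nlSplit, if_neg hc] at h
      cases hnt : nlSplit t with
      | nil => exact absurd hnt (nlSplit_ne_nil t)
      | cons q qs =>
        rw [hnt] at h
        simp only [List.mem_cons] at h
        rcases h with h | h
        · subst h
          have hq : '\n' ∉ q := ih (hnt ▸ List.mem_cons_self)
          simp only [List.mem_cons, not_or]
          exact ⟨fun e => hc e.symm, hq⟩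
        · exact ih (hnt ▸ List.mem_cons_of_mem _ h)

theorem count_go_nl (l : List Char) : ∀ (fuel : Nat) (acc : Nat), l.length ≤ fuel →
    PySem.Chars.count.go ['\n'] fuel l acc = acc + l.count '\n' := by
  induction l with
  | nil => intro fuel acc _; cases fuel <;> simp [PySem.Chars.count.go]
  | cons c t ih =>
    intro fuel acc h
    cases fuel with
    | zero => simp at h
    | succ f =>
      by_cases hc : c = '\n'
      · subst hc
        rw [show PySem.Chars.count.go ['\n'] (f+1) ('\n' :: t) acc
              = PySem.Chars.count.go ['\n'] f t (acc + 1) by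
            simp [PySem.Chars.count.go, List.isPrefixOf]]
        rw [ih f (acc+1) (by simpa using h)]
        simp
        omega
      · rw [show PySem.Chars.count.go ['\n'] (f+1) (c :: t) acc
              = PySem.Chars.count.go ['\n'] f t acc by
            simp [PySem.Chars.count.go, List.isPrefixOf, Ne.symm hc]]
        rw [ih f acc (by simpa using h)]
        simp [hc]

theorem count_nl (cs : List Char) : PySem.Chars.count cs ['\n'] = cs.count '\n' := by
  rw [show PySem.Chars.count cs ['\n'] = PySem.Chars.count.go ['\n'] cs.length cs 0 from rfl]
  rw [count_go_nl cs cs.length 0 le_rfl]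
  omega

theorem prefix_append_left {m u v : List Char} (h : m <+: u ++ v) (hlen : m.length ≤ u.length) :
    m <+: u := by
  exact (List.isPrefix_append_of_length hlen).mp h

theorem drop_append_cons_gt {l r : List Char} {c : Char} {j : Nat} (h : l.length < j) :
    (l ++ c :: r).drop j = r.drop (j - l.length - 1) := by
  rw [List.drop_append]
  rw [List.drop_eq_nil_of_le (by omega), List.nil_append]
  rw [show j - l.length = (j - l.length - 1) + 1 by omega]
  rfl

theorem find_eq_of_first {s m : List Char} {i : Nat} (hpre : m <+: s.drop i)
    (hmin : ∀ j < i, ¬ m <+: s.drop j) : PySem.Chars.find s m = (i : Int) := by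
  have hinf : m <:+: s := hpre.isInfix.trans (s.drop_suffix i).isInfix
  have hf : 0 ≤ PySem.Chars.find s m := (PySem.Chars.find_nonneg_iff s m).mpr hinf
  obtain ⟨h1, h2⟩ := PySem.Chars.find_spec hf
  rcases lt_trichotomy (PySem.Chars.find s m).toNat i with h | h | h
  · exact absurd h1 (hmin _ h)
  · omega
  · exact absurd hpre (h2 i h)

theorem find_append_of_infix {l r m : List Char} (h : m <:+: l) :
    PySem.Chars.find (l ++ '\n' :: r) m = PySem.Chars.find l m := by
  have hf : 0 ≤ PySem.Chars.find l m := (PySem.Chars.find_nonneg_iff l m).mpr h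
  obtain ⟨h1, h2⟩ := PySem.Chars.find_spec hf
  set i := (PySem.Chars.find l m).toNat with hi
  have hil : i ≤ l.length := by
    have := PySem.Chars.find_le_length l m
    omega
  have hml : m.length + i ≤ l.length := by
    have := h1.length_le
    simp only [List.length_drop] at this
    omega
  apply Eq.trans ?_ (by omega : (i : Int) = PySem.Chars.find l m)
  apply find_eq_of_first
  · rw [List.drop_append_of_le_length hil]
    exact h1.trans ((l.drop i).prefix_append _)
  · intro j hj hpre
    rw [List.drop_append_of_le_length (by omega)] at hpre
    refine h2 j hj (prefix_append_left hpre ?_)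
    simp only [List.length_drop]
    omega

theorem find_append_of_not_infix {l r m : List Char} (hm : '\n' ∉ m)
    (h : ¬ m <:+: l) :
    PySem.Chars.find (l ++ '\n' :: r) m
      = if PySem.Chars.find r m = -1 then -1 else (l.length : Int) + 1 + PySem.Chars.find r m := by
  have hno : ∀ j ≤ l.length, ¬ m <+: (l ++ '\n' :: r).drop j := by
    intro j hj hpre
    rw [List.drop_append_of_le_length hj] at hpre
    by_cases hlen : m.length ≤ l.length - j
    · refine h ((prefix_append_left hpre ?_).isInfix.trans (l.drop_suffix j).isInfix)
      simp only [List.length_drop]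
      omega
    · -- the occurrence would have to cover the '\n' at offset l.length - j
      obtain ⟨t, ht⟩ := hpre
      apply hm
      have hk : l.length - j < m.length := by omega
      have hget : m[l.length - j]? = some '\n' := by
        have e1 : (m ++ t)[l.length - j]? = m[l.length - j]? :=
          List.getElem?_append_left hk
        rw [ht] at e1
        rw [← e1, List.getElem?_append_right (by simp only [List.length_drop]; omega)]
        simp only [List.length_drop]
        rw [show l.length - j - (l.length - j) = 0 by omega]
        rfl
      exact List.mem_of_getElem? hget
  by_cases hr : PySem.Chars.find r m = -1
  · rw [if_pos hr]
    rw [PySem.Chars.find_eq_neg_one_iff] at hr ⊢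
    intro hinf
    obtain ⟨j, hpre⟩ := (PySem.Chars.exists_prefix_drop_iff_isIn m _).mpr
      ((PySem.Chars.isIn_iff_infix m _).mpr hinf)
    by_cases hjl : j ≤ l.length
    · exact hno j hjl hpre
    · rw [drop_append_cons_gt (by omega)] at hpre
      exact hr (hpre.isInfix.trans (r.drop_suffix _).isInfix)
  · rw [if_neg hr]
    have hf : 0 ≤ PySem.Chars.find r m := by
      have := PySem.Chars.neg_one_le_find r m
      omega
    obtain ⟨h1, h2⟩ := PySem.Chars.find_spec hf
    set i := (PySem.Chars.find r m).toNat with hi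
    have : PySem.Chars.find (l ++ '\n' :: r) m = ((l.length + 1 + i : Nat) : Int) := by
      apply find_eq_of_first
      · rw [drop_append_cons_gt (by omega), show l.length + 1 + i - l.length - 1 = i by omega]
        exact h1
      · intro j hj hpre
        by_cases hjl : j ≤ l.length
        · exact hno j hjl hpre
        · rw [drop_append_cons_gt (by omega)] at hpre
          exact h2 (j - l.length - 1) (by omega) hpre
    omega

theorem split_at_first {c : Char} {cs : List Char} (h : c ∈ cs) :
    ∃ l r, cs = l ++ c :: r ∧ c ∉ l := by
  induction cs with
  | nil => simp at h
  | cons d t ih =>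
    by_cases hd : d = c
    · exact ⟨[], t, by simp [hd], by simp⟩
    · obtain ⟨l, r, h1, h2⟩ := ih (by rcases List.mem_cons.mp h with h | h
                                      · exact absurd h.symm hd
                                      · exact h)
      exact ⟨d :: l, r, by rw [h1, List.cons_append], by
        simp only [List.mem_cons, not_or]
        exact ⟨fun e => hd e.symm, h2⟩⟩

theorem pyLineLoop_of_nl_mem {m : List Char} (hm : '\n' ∈ m) (cs : List Char) (i : Int) :
    pyLineLoop m (nlSplit cs) i = 0 := by
  have key : ∀ (lines : List (List Char)), (∀ p ∈ lines, '\n' ∉ p) → ∀ i : Int,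
      pyLineLoop m lines i = 0 := by
    intro lines
    induction lines with
    | nil => intro _ _; rfl
    | cons p ps ih =>
      intro hp i
      have hnin : PySem.Chars.isIn m p ≠ true := by
        intro hin
        exact hp p List.mem_cons_self
          (((PySem.Chars.isIn_iff_infix m p).mp hin).sublist.mem hm)
      simp only [pyLineLoop, if_neg hnin]
      exact ih (fun q hq => hp q (List.mem_cons_of_mem _ hq)) (i + 1)
  exact key (nlSplit cs) (fun p hp => nlSplit_mem hp) i

theorem pyLineLoop_main {m : List Char} (hm : '\n' ∉ m) :
    ∀ (n : Nat) (cs : List Char), cs.length ≤ n → ∀ i : Int,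
    pyLineLoop m (nlSplit cs) i =
      if PySem.Chars.find cs m = -1 then 0
      else i + ((cs.take (PySem.Chars.find cs m).toNat).count '\n' : Int) := by
  intro n
  induction n with
  | zero =>
    intro cs hcs i
    have : cs = [] := List.eq_nil_of_length_eq_zero (by omega)
    subst this
    by_cases hin : PySem.Chars.isIn m [] = true
    · have hinf := (PySem.Chars.isIn_iff_infix m []).mp hin
      have hf : 0 ≤ PySem.Chars.find [] m := (PySem.Chars.find_nonneg_iff _ m).mpr hinf
      rw [nlSplit_no_nl (by simp), if_neg (by omega)]
      simp [pyLineLoop, hin]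
    · have hf := (PySem.Chars.isIn_eq_false_iff m _).mp (by simpa using hin)
      rw [nlSplit_no_nl (by simp), if_pos ((PySem.Chars.find_eq_neg_one_iff _ m).mpr hf)]
      simp [pyLineLoop, hin]
  | succ n ih =>
    intro cs hcs i
    by_cases hnl : '\n' ∈ cs
    · obtain ⟨l, r, rfl, hl⟩ := split_at_first hnl
      rw [nlSplit_append r hl]
      by_cases hin : PySem.Chars.isIn m l = true
      · have hinf := (PySem.Chars.isIn_iff_infix m l).mp hin
        have hf : 0 ≤ PySem.Chars.find l m := (PySem.Chars.find_nonneg_iff l m).mpr hinf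
        rw [find_append_of_infix hinf, if_neg (by omega)]
        have hil : (PySem.Chars.find l m).toNat ≤ l.length := by
          have := PySem.Chars.find_le_length l m; omega
        rw [List.take_append_of_le_length hil]
        have hcount : (l.take (PySem.Chars.find l m).toNat).count '\n' = 0 :=
          List.count_eq_zero.mpr (fun hmem => hl (List.take_subset _ _ hmem))
        simp [pyLineLoop, hin, hcount]
      · have hninf : ¬ m <:+: l := fun hinf => by
          simp [(PySem.Chars.isIn_iff_infix m l).mpr hinf] at hin
        rw [find_append_of_not_infix hm hninf]
        have hlen : r.length ≤ n := by simp at hcs; omega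
        have IH := ih r hlen (i + 1)
        simp only [pyLineLoop, if_neg hin]
        by_cases hr : PySem.Chars.find r m = -1
        · rw [IH, if_pos hr, hr]
          norm_num
        · have hf : 0 ≤ PySem.Chars.find r m := by
            have := PySem.Chars.neg_one_le_find r m; omega
          rw [IH]
          simp only [if_neg hr]
          rw [if_neg (by omega : ¬ ((l.length : Int) + 1 + PySem.Chars.find r m = -1))]
          have htonat : ((l.length : Int) + 1 + PySem.Chars.find r m).toNat
              = l.length + (1 + (PySem.Chars.find r m).toNat) := by omega
          rw [htonat, List.take_length_add_append,
            show (1 + (PySem.Chars.find r m).toNat) = (PySem.Chars.find r m).toNat + 1 by omega,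
            List.take_succ_cons]
          have hcl : l.count '\n' = 0 := List.count_eq_zero.mpr hl
          simp [List.count_append, hcl]
          omega
    · rw [nlSplit_no_nl hnl]
      by_cases hin : PySem.Chars.isIn m cs = true
      · have hinf := (PySem.Chars.isIn_iff_infix m cs).mp hin
        have hf : 0 ≤ PySem.Chars.find cs m := (PySem.Chars.find_nonneg_iff cs m).mpr hinf
        rw [if_neg (by omega)]
        have hcount : (cs.take (PySem.Chars.find cs m).toNat).count '\n' = 0 :=
          List.count_eq_zero.mpr (fun hmem => hnl (List.take_subset _ _ hmem))
        simp [pyLineLoop, hin, hcount]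
      · have hf := (PySem.Chars.isIn_eq_false_iff m cs).mp (by simpa using hin)
        rw [if_pos ((PySem.Chars.find_eq_neg_one_iff cs m).mpr hf)]
        simp [pyLineLoop, hin]

-- ===== VERDICT (by name: the statement is the Claim_ definition above) =====
theorem find_line_number_py_spec : Claim_equal_find_line_number_py := by
  intro content match_ _
  unfold Spec_find_line_number_py find_line_number_py find_line_number_py_alt
  rw [splitOn_nl]
  by_cases hnl : PySem.Str.isIn "\n" match_ = true
  · rw [if_pos hnl]
    have hmem : '\n' ∈ match_.toList := by
      have h := (PySem.Str.isIn_iff_infix "\n" match_).mp hnl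
      exact h.sublist.mem (by simp)
    exact pyLineLoop_of_nl_mem hmem content.toList 1
  · rw [if_neg hnl]
    have hm : '\n' ∉ match_.toList := by
      intro hmem
      obtain ⟨s, t, hst⟩ := List.append_of_mem hmem
      exact hnl ((PySem.Str.isIn_iff_infix "\n" match_).mpr ⟨s, t, by rw [hst]; simp⟩)
    rw [pyLineLoop_main hm content.toList.length content.toList le_rfl 1]
    have hfind : PySem.Str.find content match_ = PySem.Chars.find content.toList match_.toList := by
      simp [pysem]
    by_cases hf : PySem.Chars.find content.toList match_.toList = -1
    · rw [if_pos hf]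
      simp only [hfind, hf]
      norm_num
    · rw [if_neg hf]
      have hnn : 0 ≤ PySem.Chars.find content.toList match_.toList := by
        have := PySem.Chars.neg_one_le_find content.toList match_.toList; omega
      rw [hfind]
      simp only [if_neg hf]
      rw [PySem.List.slice_to content.toList hnn, count_nl]
      omega
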